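-- pv_equiv track=rewrite | github.com/vijayakumar75/Big_Data_Concepts_and_Material | Big Data-High Performance computing/Project_3_Map_Reduce_Product_Suggestion/3/reducer.py | returner1
-- ===== SOURCE A (Python) =====
-- import itertools
--
-- def returner1(stuff_1):
--     DList = []
--     for L in range(0, len(stuff_1)+1):
--         for subset in itertools.combinations(stuff_1, L):
--             lists = []
--             if len(subset) >= 2:
--                 lists = subset
--                 DList.append(list(lists))
--     return DList
-- ===== SOURCE B (Python) =====
-- def returner1(stuff_1):
--     # One right-to-left DP pass: buckets[k] collects all size-k combinations
--     # of the suffix processed so far, kept in lexicographic index order.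
--     seq = list(stuff_1)
--     buckets = [[[]]]  # sizes 0..0 for the empty suffix
--     for x in reversed(seq):
--         new = [buckets[0]]
--         for k in range(1, len(buckets) + 1):
--             with_x = [[x] + c for c in buckets[k - 1]]
--             rest = buckets[k] if k < len(buckets) else []
--             new.append(with_x + rest)
--         buckets = new
--     out = []
--     for bucket in buckets[2:]:
--         out.extend(bucket)
--     return out
-- ===== Notes on version B (the rewrite author's own statement) =====
-- stated objective: alternative
-- what changed: Replaces the per-size calls to itertools.combinations (regenerating choices for every L) by a single right-to-left dynamic-programming pass that maintains, per size k, all size-k combinations of the processed suffix in lexicographic order, then concatenates the buckets of size >= 2.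
import Mathlib
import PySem

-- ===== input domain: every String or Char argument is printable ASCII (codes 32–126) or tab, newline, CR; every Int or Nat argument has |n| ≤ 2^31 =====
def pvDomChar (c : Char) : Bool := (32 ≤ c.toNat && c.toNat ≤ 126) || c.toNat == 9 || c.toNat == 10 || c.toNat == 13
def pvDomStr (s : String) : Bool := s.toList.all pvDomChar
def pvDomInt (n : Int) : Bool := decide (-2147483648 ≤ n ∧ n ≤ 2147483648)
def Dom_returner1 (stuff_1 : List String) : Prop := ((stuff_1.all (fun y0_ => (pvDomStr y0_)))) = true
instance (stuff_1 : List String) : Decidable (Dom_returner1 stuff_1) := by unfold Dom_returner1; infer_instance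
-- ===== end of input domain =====

-- B replaces the per-size itertools.combinations generation by a single right-to-left
-- DP pass over the list maintaining per-size buckets of combinations (alternative algorithm).

-- ===== PORT A =====
-- helper modeling itertools.combinations(xs, L) on a list: lexicographic index order
def pyCombs : Nat → List String → List (List String)
  | 0, _ => [[]]
  | _ + 1, [] => []
  | L + 1, x :: xs => (pyCombs L xs).map (fun c => x :: c) ++ pyCombs (L + 1) xs

def returner1 (stuff_1 : List String) : List (List String) :=
  -- for L in range(0, len+1): for subset in combinations(stuff_1, L): if len(subset)>=2: append
  (List.range (stuff_1.length + 1)).foldl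
    (fun DList L =>
      (pyCombs L stuff_1).foldl
        (fun DL subset => if subset.length ≥ 2 then DL ++ [subset] else DL) DList)
    []

-- ===== PORT B =====
-- inner `for k in range(1, len(buckets)+1)` loop of Source B: walks the bucket list,
-- pairing buckets[k-1] with buckets[k] (missing tail = [])
def bStepAux (x : String) : List (List (List String)) → List (List (List String))
  | [] => []
  | [b] => [b.map (fun c => x :: c)]
  | b :: c :: rest => (b.map (fun c' => x :: c') ++ c) :: bStepAux x (c :: rest)

-- one iteration of Source B's `for x in reversed(seq)` loop
def bStep (x : String) (buckets : List (List (List String))) : List (List (List String)) :=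
  match buckets with
  | [] => []
  | b :: _ => b :: bStepAux x buckets

def returner1_alt (stuff_1 : List String) : List (List String) :=
  let buckets := stuff_1.reverse.foldl (fun bs x => bStep x bs) [[[]]]
  ((buckets.drop 2).flatten)

-- ===== PRECONDITION & SPEC =====
def Spec_returner1 (stuff_1 : List String) (out : List (List String)) : Prop := out = returner1_alt stuff_1
instance (stuff_1 : List String) (out : List (List String)) : Decidable (Spec_returner1 stuff_1 out) := by unfold Spec_returner1; infer_instance

-- ===== CLAIM (what is proved, stated in full; the proofs are below) =====
def Claim_equal_returner1 : Prop := ∀ (stuff_1 : List String), Dom_returner1 stuff_1 → Spec_returner1 stuff_1 (returner1 stuff_1)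

-- ===== LEMMAS AND PROOFS =====

theorem pyCombs_zero (xs : List String) : pyCombs 0 xs = [[]] := by
  cases xs <;> rfl

theorem pyCombs_eq_nil_of_gt {L : Nat} {xs : List String} (h : xs.length < L) :
    pyCombs L xs = [] := by
  induction xs generalizing L with
  | nil => cases L with
    | zero => omega
    | succ n => simp [pyCombs]
  | cons x xs ih =>
    cases L with
    | zero => omega
    | succ n =>
      simp only [pyCombs]
      rw [ih (by simpa using h), ih (by simp at h; omega)]
      simp

theorem length_of_mem_pyCombs {L : Nat} {xs : List String} {s : List String}
    (h : s ∈ pyCombs L xs) : s.length = L := by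
  induction xs generalizing L s with
  | nil => cases L with
    | zero => simp [pyCombs] at h; simp [h]
    | succ n => simp [pyCombs] at h
  | cons x xs ih =>
    cases L with
    | zero => simp [pyCombs] at h; simp [h]
    | succ n =>
      simp only [pyCombs, List.mem_append, List.mem_map] at h
      rcases h with ⟨c, hc, rfl⟩ | h
      · simp [ih hc]
      · exact ih h

theorem inner_foldl_eq {L : Nat} (l : List (List String))
    (hl : ∀ s ∈ l, s.length = L) (acc : List (List String)) :
    l.foldl (fun DL subset => if subset.length ≥ 2 then DL ++ [subset] else DL) acc
      = acc ++ (if 2 ≤ L then l else []) := by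
  induction l generalizing acc with
  | nil => simp
  | cons s t ih =>
    have hs : s.length = L := hl s (by simp)
    simp only [List.foldl_cons]
    rw [ih (fun a ha => hl a (by simp [ha]))]
    by_cases h2 : 2 ≤ L
    · simp [hs, h2]
    · simp [hs, h2]

theorem outer_foldl_flatten (g : Nat → List (List String)) (l : List Nat)
    (init : List (List String)) :
    l.foldl (fun acc L => acc ++ g L) init = init ++ (l.map g).flatten := by
  induction l generalizing init with
  | nil => simp
  | cons a t ih => simp [ih, List.append_assoc]

theorem returner1_eq_flatten (xs : List String) :
    returner1 xs
      = ((List.range (xs.length + 1)).map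
          (fun L => if 2 ≤ L then pyCombs L xs else [])).flatten := by
  unfold returner1
  have hcongr : ∀ (l : List Nat) (init : List (List String)),
      l.foldl (fun DList L =>
        (pyCombs L xs).foldl
          (fun DL subset => if subset.length ≥ 2 then DL ++ [subset] else DL) DList) init
      = l.foldl (fun acc L => acc ++ (if 2 ≤ L then pyCombs L xs else [])) init := by
    intro l
    induction l with
    | nil => intro init; rfl
    | cons a t ih =>
      intro init
      simp only [List.foldl_cons]
      rw [ih, inner_foldl_eq (L := a) (pyCombs a xs) (fun s hs => length_of_mem_pyCombs hs) init]
  rw [hcongr, outer_foldl_flatten]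
  simp

theorem bStepAux_spec (x : String) (xs : List String) :
    ∀ (a m : Nat), a + m = xs.length →
      bStepAux x ((List.range' a (m + 1)).map (fun k => pyCombs k xs))
        = (List.range' (a + 1) (m + 1)).map (fun k => pyCombs k (x :: xs)) := by
  intro a m
  induction m generalizing a with
  | zero =>
    intro h
    have hnil : pyCombs (a + 1) xs = [] := pyCombs_eq_nil_of_gt (by omega)
    show bStepAux x (((a) :: List.range' (a+1) 0).map (fun k => pyCombs k xs))
        = (((a+1) :: List.range' (a+2) 0).map (fun k => pyCombs k (x :: xs)))
    show bStepAux x [pyCombs a xs] = [pyCombs (a + 1) (x :: xs)]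
    rw [show pyCombs (a + 1) (x :: xs)
          = (pyCombs a xs).map (fun c => x :: c) ++ pyCombs (a + 1) xs from rfl,
        hnil, List.append_nil]
    rfl
  | succ m ih =>
    intro h
    rw [List.range'_succ, List.map_cons, List.range'_succ (s := a + 1), List.map_cons]
    have h2 : m + 1 ≥ 1 := by omega
    rw [List.range'_succ (s := a + 1), List.map_cons]
    simp only [bStepAux]
    refine List.cons_eq_cons.mpr ⟨rfl, ?_⟩
    have := ih (a + 1) (by omega)
    rw [List.range'_succ, List.map_cons] at this
    exact this

theorem bStep_spec (x : String) (xs : List String) :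
    bStep x ((List.range' 0 (xs.length + 1)).map (fun k => pyCombs k xs))
      = (List.range' 0 (xs.length + 2)).map (fun k => pyCombs k (x :: xs)) := by
  rw [List.range'_succ, List.map_cons]
  simp only [bStep]
  rw [List.range'_succ (s := 0), List.map_cons]
  refine List.cons_eq_cons.mpr ⟨(pyCombs_zero xs).trans (pyCombs_zero (x :: xs)).symm, ?_⟩
  have := bStepAux_spec x xs 0 xs.length (by omega)
  rw [List.range'_succ, List.map_cons] at this
  simpa using this

theorem buckets_spec (xs : List String) :
    xs.reverse.foldl (fun bs x => bStep x bs) [[[]]]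
      = (List.range' 0 (xs.length + 1)).map (fun k => pyCombs k xs) := by
  rw [List.foldl_reverse]
  induction xs with
  | nil => simp [pyCombs]
  | cons x t ih =>
    simp only [List.foldr_cons, ih]
    simpa using bStep_spec x t

theorem mem_range'_ge {a n k : Nat} (h : k ∈ List.range' a n) : a ≤ k := by
  rcases List.mem_range'.mp h with ⟨i, _, rfl⟩
  omega

theorem flatten_drop2 (f : Nat → List (List String)) (n : Nat) :
    ((((List.range' 0 (n + 1)).map f).drop 2).flatten)
      = (((List.range' 0 (n + 1)).map (fun L => if 2 ≤ L then f L else [])).flatten) := by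
  cases n with
  | zero => simp
  | succ m =>
    rw [List.range'_succ, List.range'_succ]
    simp only [List.map_cons, List.flatten_cons, List.drop_succ_cons]
    have h01 : ¬ (2 ≤ 0) ∧ ¬ (2 ≤ 1) := by omega
    rw [if_neg h01.1, if_neg h01.2]
    simp only [List.nil_append]
    congr 1
    apply List.map_congr_left
    intro k hk
    have : 2 ≤ k := mem_range'_ge hk
    rw [if_pos this]

-- ===== VERDICT (by name: the statement is the Claim_ definition above) =====
theorem returner1_spec : Claim_equal_returner1 := by
  intro xs _
  unfold Spec_returner1 returner1_alt
  rw [buckets_spec, returner1_eq_flatten, List.range_eq_range']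
  exact (flatten_drop2 (fun k => pyCombs k xs) xs.length).symm
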